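-- pv_equiv track=rewrite | github.com/Himalaw/flexible_jobshop | CODE/sfla.py | calculate_standby_times
-- ===== SOURCE A (Python) =====
-- def calculate_standby_times(result_by_machine, Cmax):
--     standby_times = []
--     for machine in result_by_machine:
--         if not machine:
--             standby_times.append(Cmax)
--         else:
--             standby = sum(machine[i + 1][5] - machine[i][6] for i in range(len(machine) - 1))
--             standby += machine[0][5] + (Cmax - machine[-1][6])
--             standby_times.append(standby)
--     return standby_times
-- ===== SOURCE B (Python) =====
-- def calculate_standby_times(result_by_machine, Cmax):
--     return [Cmax - sum(t[6] - t[5] for t in machine) for machine in result_by_machine]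
-- ===== Notes on version B (the rewrite author's own statement) =====
-- stated objective: simpler
-- what changed: B replaces A's gap-summation over consecutive task pairs plus head/tail slack (with a special empty-machine branch) by the telescoped identity standby = Cmax - sum of task durations, as a single comprehension with no branch.
import Mathlib
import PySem

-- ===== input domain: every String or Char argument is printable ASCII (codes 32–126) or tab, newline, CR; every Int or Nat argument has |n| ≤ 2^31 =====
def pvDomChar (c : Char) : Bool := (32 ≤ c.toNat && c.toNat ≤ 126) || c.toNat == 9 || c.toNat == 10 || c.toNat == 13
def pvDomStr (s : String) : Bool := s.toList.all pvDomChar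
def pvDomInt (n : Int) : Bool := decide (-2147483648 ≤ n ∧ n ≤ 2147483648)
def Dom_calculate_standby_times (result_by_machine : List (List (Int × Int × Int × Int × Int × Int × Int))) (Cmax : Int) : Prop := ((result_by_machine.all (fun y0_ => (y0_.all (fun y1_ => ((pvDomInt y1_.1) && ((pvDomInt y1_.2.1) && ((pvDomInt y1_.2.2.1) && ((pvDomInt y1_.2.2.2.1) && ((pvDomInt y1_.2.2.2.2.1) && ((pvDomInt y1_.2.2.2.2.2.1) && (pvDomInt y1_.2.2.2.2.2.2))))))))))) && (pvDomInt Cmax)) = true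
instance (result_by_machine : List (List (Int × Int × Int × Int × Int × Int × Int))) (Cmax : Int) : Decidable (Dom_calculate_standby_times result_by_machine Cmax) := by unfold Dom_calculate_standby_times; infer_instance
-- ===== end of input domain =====

-- B replaces A's gap-summation over consecutive pairs plus head/tail slack (with an
-- empty-machine branch) by the telescoped identity standby = Cmax - total busy time; simpler, no branch.
-- ===== PORT A =====
def pvD0 : Int × Int × Int × Int × Int × Int × Int := (0, 0, 0, 0, 0, 0, 0)

def calculate_standby_times (result_by_machine : List (List (Int × Int × Int × Int × Int × Int × Int))) (Cmax : Int) : List Int :=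
  result_by_machine.foldl (fun standby_times machine =>
    if machine.isEmpty then
      standby_times ++ [Cmax]
    else
      let standby : Int :=
        (PySem.List.pyRange 0 ((machine.length : Int) - 1) 1).foldl
          (fun acc i =>
            acc + ((PySem.List.pyGetD machine (i + 1) pvD0).2.2.2.2.2.1
                 - (PySem.List.pyGetD machine i pvD0).2.2.2.2.2.2)) 0
      let standby := standby + (PySem.List.pyGetD machine 0 pvD0).2.2.2.2.2.1
                   + (Cmax - (PySem.List.pyGetD machine (-1) pvD0).2.2.2.2.2.2)
      standby_times ++ [standby]) []

-- ===== PORT B =====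
def calculate_standby_times_alt (result_by_machine : List (List (Int × Int × Int × Int × Int × Int × Int))) (Cmax : Int) : List Int :=
  result_by_machine.map (fun machine =>
    Cmax - machine.foldl (fun acc t => acc + (t.2.2.2.2.2.2 - t.2.2.2.2.2.1)) 0)

-- ===== PRECONDITION & SPEC =====
def Spec_calculate_standby_times (result_by_machine : List (List (Int × Int × Int × Int × Int × Int × Int))) (Cmax : Int) (out : List Int) : Prop := out = calculate_standby_times_alt result_by_machine Cmax
instance (result_by_machine : List (List (Int × Int × Int × Int × Int × Int × Int))) (Cmax : Int) (out : List Int) : Decidable (Spec_calculate_standby_times result_by_machine Cmax out) := by unfold Spec_calculate_standby_times; infer_instance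

-- ===== CLAIM (what is proved, stated in full; the proofs are below) =====
def Claim_equal_calculate_standby_times : Prop := ∀ (result_by_machine : List (List (Int × Int × Int × Int × Int × Int × Int))) (Cmax : Int), Dom_calculate_standby_times result_by_machine Cmax → Spec_calculate_standby_times result_by_machine Cmax (calculate_standby_times result_by_machine Cmax)

-- ===== LEMMAS AND PROOFS =====

-- ===== VERDICT (by name: the statement is the Claim_ definition above) =====
lemma pv_tele (x : Int × Int × Int × Int × Int × Int × Int)
    (xs : List (Int × Int × Int × Int × Int × Int × Int)) :
    (((x :: xs).zip xs).map (fun p => p.2.2.2.2.2.2.1 - p.1.2.2.2.2.2.2)).sum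
      = (xs.map (fun t => t.2.2.2.2.2.1)).sum
        - (((x :: xs).dropLast).map (fun t => t.2.2.2.2.2.2)).sum := by
  induction xs generalizing x with
  | nil => simp
  | cons y ys ih => simp [ih y]; ring

lemma pv_machine (Cmax : Int) (x : Int × Int × Int × Int × Int × Int × Int)
    (xs : List (Int × Int × Int × Int × Int × Int × Int)) :
    ((PySem.List.pyRange 0 (((x :: xs).length : Int) - 1) 1).foldl
        (fun acc i =>
          acc + ((PySem.List.pyGetD (x :: xs) (i + 1) pvD0).2.2.2.2.2.1
               - (PySem.List.pyGetD (x :: xs) i pvD0).2.2.2.2.2.2)) 0)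
      + (PySem.List.pyGetD (x :: xs) 0 pvD0).2.2.2.2.2.1
      + (Cmax - (PySem.List.pyGetD (x :: xs) (-1) pvD0).2.2.2.2.2.2)
      = Cmax - (x :: xs).foldl (fun acc t => acc + (t.2.2.2.2.2.2 - t.2.2.2.2.2.1)) 0 := by
  have hzl : ((((x :: xs).zip xs).length : Int)) = ((x :: xs).length : Int) - 1 := by
    simp
  have hcongr :
      (PySem.List.pyRange 0 (((x :: xs).length : Int) - 1) 1).foldl
        (fun acc i =>
          acc + ((PySem.List.pyGetD (x :: xs) (i + 1) pvD0).2.2.2.2.2.1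
               - (PySem.List.pyGetD (x :: xs) i pvD0).2.2.2.2.2.2)) 0
      = (PySem.List.pyRange 0 ((((x :: xs).zip xs).length : Int)) 1).foldl
        (fun acc i =>
          acc + ((PySem.List.pyGetD ((x :: xs).zip xs) i (pvD0, pvD0)).2.2.2.2.2.2.1
               - (PySem.List.pyGetD ((x :: xs).zip xs) i (pvD0, pvD0)).1.2.2.2.2.2.2)) 0 := by
    rw [hzl]
    apply PySem.List.foldl_congr_mem'
    intro i hi acc
    rw [PySem.List.mem_pyRange_one] at hi
    obtain ⟨h0, h1⟩ := hi
    simp only [List.length_cons] at h1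
    push_cast at h1
    have h2 := PySem.List.pyGetD_eq_getElem ((x :: xs).zip xs) (pvD0, pvD0) h0
      (by simp only [List.length_zip, List.length_cons]; omega)
    have h3 := PySem.List.pyGetD_eq_getElem (x :: xs) pvD0 (i := i + 1) (by omega)
      (by simp only [List.length_cons]; omega)
    have h4 := PySem.List.pyGetD_eq_getElem (x :: xs) pvD0 h0
      (by simp only [List.length_cons]; omega)
    have h5 : (i + 1).toNat = i.toNat + 1 := by omega
    rw [h2, h3, h4]
    simp [List.getElem_zip, h5]
  rw [hcongr, PySem.List.foldl_pyRange_zero_pyGetD' ((x :: xs).zip xs) (pvD0, pvD0)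
      (fun acc p => acc + (p.2.2.2.2.2.2.1 - p.1.2.2.2.2.2.2)) 0, PySem.List.foldl_add,
    PySem.List.foldl_add, PySem.List.pyGetD_zero_cons,
    PySem.List.pyGetD_neg_one (x :: xs) pvD0 (List.cons_ne_nil x xs), pv_tele]
  have hlast : ((x :: xs).dropLast.map (fun t => t.2.2.2.2.2.2)).sum
        + ((x :: xs).getLast (List.cons_ne_nil x xs)).2.2.2.2.2.2
      = ((x :: xs).map (fun t => t.2.2.2.2.2.2)).sum := by
    conv_rhs => rw [← List.dropLast_concat_getLast (List.cons_ne_nil x xs)]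
    simp
  have hsum : ((x :: xs).map (fun t => t.2.2.2.2.2.2 - t.2.2.2.2.2.1)).sum
      = ((x :: xs).map (fun t => t.2.2.2.2.2.2)).sum
        - ((x :: xs).map (fun t => t.2.2.2.2.2.1)).sum := by
    induction (x :: xs) with
    | nil => simp
    | cons y ys ih => simp [ih]; ring
  have hhead : ((x :: xs).map (fun t => t.2.2.2.2.2.1)).sum
      = x.2.2.2.2.2.1 + (xs.map (fun t => t.2.2.2.2.2.1)).sum := by simp
  omega

lemma pv_fold (Cmax : Int) (rbm : List (List (Int × Int × Int × Int × Int × Int × Int))) :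
    ∀ acc : List Int,
      rbm.foldl (fun standby_times machine =>
        if machine.isEmpty then
          standby_times ++ [Cmax]
        else
          let standby : Int :=
            (PySem.List.pyRange 0 ((machine.length : Int) - 1) 1).foldl
              (fun acc i =>
                acc + ((PySem.List.pyGetD machine (i + 1) pvD0).2.2.2.2.2.1
                     - (PySem.List.pyGetD machine i pvD0).2.2.2.2.2.2)) 0
          let standby := standby + (PySem.List.pyGetD machine 0 pvD0).2.2.2.2.2.1
                       + (Cmax - (PySem.List.pyGetD machine (-1) pvD0).2.2.2.2.2.2)
          standby_times ++ [standby]) acc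
      = acc ++ rbm.map (fun machine =>
          Cmax - machine.foldl (fun acc t => acc + (t.2.2.2.2.2.2 - t.2.2.2.2.2.1)) 0) := by
  induction rbm with
  | nil => intro acc; simp
  | cons m ms ih =>
    intro acc
    rw [List.foldl_cons, ih]
    cases m with
    | nil => simp
    | cons x xs =>
      simp only [List.isEmpty_cons, if_neg, Bool.false_eq_true, not_false_eq_true,
        List.map_cons, List.append_assoc, List.singleton_append]
      rw [pv_machine Cmax x xs]

theorem calculate_standby_times_spec : Claim_equal_calculate_standby_times := by
  intro rbm Cmax _
  unfold Spec_calculate_standby_times calculate_standby_times calculate_standby_times_alt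
  simpa using pv_fold Cmax rbm []
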